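-- pv_equiv track=rewrite | github.com/Venkat-3010/FETP---Venkatesan | app.py | generate_diamond
-- ===== SOURCE A (Python) =====
-- def generate_diamond(num_lines):
--     lines = []
--     text = "formulqsolutions"
--     text_length = len(text)
--
--     for i in range(1, num_lines ):
--         line = ' ' * (num_lines - i)
--         for j in range(2 * i - 1):
--             line += text[j % text_length]
--         lines.append(line)
--
--     for i in range(num_lines , 0, -1):
--         line = ' ' * (num_lines - i)
--         for j in range(2 * i - 1):
--             line += text[j % text_length]
--         lines.append(line)
--
--     return lines
-- ===== SOURCE B (Python) =====
-- def generate_diamond(num_lines):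
--     text = "formulqsolutions"
--
--     def row(i):
--         w = 2 * i - 1
--         return ' ' * (num_lines - i) + (text * w)[:w]
--
--     return [row(i) for i in
--             list(range(1, num_lines)) + list(range(num_lines, 0, -1))]
-- ===== Notes on version B (the rewrite author's own statement) =====
-- stated objective: idiomatic
-- what changed: The modulo-indexed character-by-character inner loop is replaced by repeat-and-truncate string arithmetic ((text*w)[:w]) and the two symmetric outer loops are merged into one comprehension over the concatenated index sequence.
import Mathlib
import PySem

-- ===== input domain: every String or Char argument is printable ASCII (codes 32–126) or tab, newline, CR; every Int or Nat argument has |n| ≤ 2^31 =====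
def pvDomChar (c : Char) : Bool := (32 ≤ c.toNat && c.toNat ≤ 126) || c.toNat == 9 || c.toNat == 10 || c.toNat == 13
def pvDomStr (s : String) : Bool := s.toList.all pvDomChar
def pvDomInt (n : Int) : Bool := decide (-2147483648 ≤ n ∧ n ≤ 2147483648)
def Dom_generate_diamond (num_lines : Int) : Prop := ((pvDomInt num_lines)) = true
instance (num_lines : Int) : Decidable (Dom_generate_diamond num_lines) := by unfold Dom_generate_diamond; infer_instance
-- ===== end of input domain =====

-- B replaces the modulo-indexed inner character loop by repeat-and-truncate string
-- arithmetic and merges the two symmetric outer loops into one pass over the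
-- concatenated index sequence (idiomatic restructuring, same asymptotic cost).


-- ===== PORT A =====
-- strings are handled as their character lists (PySem.Chars); 'line += text[j % L]'
-- appends the character, 'String.ofList' packs the finished line.
def generate_diamond (num_lines : Int) : List String :=
  let text : List Char := "formulqsolutions".toList
  let text_length : Int := PySem.Chars.len text
  let lines :=
    (PySem.List.pyRange 1 num_lines 1).foldl (fun lines i =>
      let line := List.replicate (num_lines - i).toNat ' '
      let line := (PySem.List.pyRange 0 (2 * i - 1) 1).foldl
        (fun line j => line ++ [PySem.List.pyGetD text (PySem.Int.mod j text_length) ' ']) line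
      lines ++ [String.ofList line]) []
  (PySem.List.pyRange num_lines 0 (-1)).foldl (fun lines i =>
    let line := List.replicate (num_lines - i).toNat ' '
    let line := (PySem.List.pyRange 0 (2 * i - 1) 1).foldl
      (fun line j => line ++ [PySem.List.pyGetD text (PySem.Int.mod j text_length) ' ']) line
    lines ++ [String.ofList line]) lines

-- ===== PORT B =====
-- 'text * w' is flatten (replicate w.toNat text); '[:w]' is PySem.List.slice.
def generate_diamond_alt (num_lines : Int) : List String :=
  let text : List Char := "formulqsolutions".toList
  let row : Int → String := fun i =>
    let w : Int := 2 * i - 1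
    String.ofList (List.replicate (num_lines - i).toNat ' ' ++
      PySem.List.slice (List.flatten (List.replicate w.toNat text)) none (some w))
  (PySem.List.pyRange 1 num_lines 1 ++ PySem.List.pyRange num_lines 0 (-1)).map row

-- ===== PRECONDITION & SPEC =====
def Spec_generate_diamond (num_lines : Int) (out : List String) : Prop := out = generate_diamond_alt num_lines
instance (num_lines : Int) (out : List String) : Decidable (Spec_generate_diamond num_lines out) := by unfold Spec_generate_diamond; infer_instance

-- ===== CLAIM (what is proved, stated in full; the proofs are below) =====
def Claim_equal_generate_diamond : Prop := ∀ (num_lines : Int), Dom_generate_diamond num_lines → Spec_generate_diamond num_lines (generate_diamond num_lines)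

-- ===== LEMMAS AND PROOFS =====

-- flatten of replicated copies, read at index j, is cs at j mod |cs|
lemma getElem?_flatten_replicate (cs : List Char) (K j : Nat) (h : j < cs.length * K) :
    (List.flatten (List.replicate K cs))[j]? = cs[j % cs.length]? := by
  induction K generalizing j with
  | zero => omega
  | succ K ih =>
    rw [List.replicate_succ, List.flatten_cons]
    rw [Nat.mul_succ] at h
    by_cases hj : j < cs.length
    · rw [List.getElem?_append_left hj, Nat.mod_eq_of_lt hj]
    · rw [Nat.not_lt] at hj
      rw [List.getElem?_append_right hj, ih (j - cs.length) (by omega),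
        Nat.mod_eq_sub_mod hj]

-- the character-by-character build equals the truncated repetition
lemma map_mod_eq_take (cs : List Char) (hpos : 0 < cs.length) (w K : Nat) (hw : w ≤ cs.length * K) :
    (List.range w).map (fun k => cs.getD (k % cs.length) ' ')
      = (List.flatten (List.replicate K cs)).take w := by
  apply List.ext_getElem?
  intro j
  rw [List.getElem?_map, List.getElem?_take]
  by_cases hj : j < w
  · have hjK : j < cs.length * K := lt_of_lt_of_le hj hw
    rw [List.getElem?_range hj, if_pos hj, getElem?_flatten_replicate cs K j hjK]
    have hjm : j % cs.length < cs.length := Nat.mod_lt _ hpos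
    simp [List.getD, List.getElem?_eq_getElem hjm]
  · rw [if_neg hj]
    have h1 : (List.range w)[j]? = none := by
      simp only [List.getElem?_eq_none_iff, List.length_range]; omega
    rw [h1]; rfl

-- one line's characters: A's modulo-indexed loop body equals B's repeat-and-truncate
lemma row_eq (i : Int) (hi : 1 ≤ i) :
    List.map (fun j => PySem.List.pyGetD "formulqsolutions".toList
        (PySem.Int.mod j (PySem.Chars.len "formulqsolutions".toList)) ' ')
      (PySem.List.pyRange 0 (2 * i - 1) 1)
    = PySem.List.slice (List.flatten (List.replicate (2 * i - 1).toNat "formulqsolutions".toList))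
        none (some (2 * i - 1)) := by
  set cs := "formulqsolutions".toList with hcs
  have hlen : cs.length = 16 := by decide
  set w : Int := 2 * i - 1 with hw
  have hw0 : 0 ≤ w := by omega
  rw [PySem.List.pyRange_one, PySem.List.slice_to _ hw0, List.map_map]
  have hwt : w.toNat ≤ cs.length * w.toNat := by rw [hlen]; omega
  rw [← map_mod_eq_take cs (by omega) w.toNat w.toNat hwt, sub_zero]
  apply List.map_congr_left
  intro k _
  simp only [Function.comp, zero_add]
  have hl : PySem.Chars.len cs = ((16 : Nat) : Int) := by
    rw [PySem.Chars.len_eq, hlen]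
  rw [hl, PySem.Int.mod_natCast k 16, PySem.List.pyGetD_natCast, hlen]

-- ===== VERDICT (by name: the statement is the Claim_ definition above) =====
theorem generate_diamond_spec : Claim_equal_generate_diamond := by
  intro n _
  show generate_diamond n = generate_diamond_alt n
  unfold generate_diamond generate_diamond_alt
  simp only [PySem.List.foldl_append_singleton_eq_map, List.nil_append, List.map_append]
  congr 1
  · apply List.map_congr_left
    intro i hi
    rw [PySem.List.mem_pyRange_one] at hi
    exact congrArg String.ofList (congrArg _ (row_eq i hi.1))
  · apply List.map_congr_left
    intro i hi
    rw [PySem.List.mem_pyRange_neg_one] at hi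
    exact congrArg String.ofList (congrArg _ (row_eq i (by omega)))
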